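-- pv_equiv track=rewrite | github.com/auto-dns/docker-coredns-sync | src/record.py | fqdn_to_zone_and_label
-- ===== SOURCE A (Python) =====
-- def fqdn_to_zone_and_label(fqdn):
--     fqdn = fqdn.rstrip(".")
--     parts = fqdn.split(".")
--     for i in range(1, len(parts)):
--         zone = ".".join(parts[i:]) + "."
--         label = ".".join(parts[:i])
--         return zone, label
--     return fqdn + ".", "@"
-- ===== SOURCE B (Python) =====
-- def fqdn_to_zone_and_label(fqdn):
--     n = len(fqdn)
--     while n > 0 and fqdn[n - 1] == ".":
--         n -= 1
--     i = 0
--     while i < n and fqdn[i] != ".":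
--         i += 1
--     if i < n:
--         return fqdn[i + 1:n] + ".", fqdn[:i]
--     return fqdn[:n] + ".", "@"
-- ===== Notes on version B (the rewrite author's own statement) =====
-- stated objective: alternative
-- what changed: Replaces rstrip/split-into-parts plus a one-trip loop with slice-joins by two explicit index scans (one from the end over trailing dots, one from the start to the first dot) and direct index slicing, using no string methods and building no parts list.
import Mathlib
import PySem

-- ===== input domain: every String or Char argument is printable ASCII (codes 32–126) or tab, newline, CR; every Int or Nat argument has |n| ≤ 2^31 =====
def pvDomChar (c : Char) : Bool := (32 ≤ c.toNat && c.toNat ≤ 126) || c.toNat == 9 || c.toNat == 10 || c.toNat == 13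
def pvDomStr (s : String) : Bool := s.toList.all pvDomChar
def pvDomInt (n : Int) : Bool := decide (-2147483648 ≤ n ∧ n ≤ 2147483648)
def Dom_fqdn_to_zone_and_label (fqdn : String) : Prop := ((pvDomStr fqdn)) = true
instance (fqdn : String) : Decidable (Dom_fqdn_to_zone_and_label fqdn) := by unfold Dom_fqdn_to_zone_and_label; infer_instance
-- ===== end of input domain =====

-- B replaces A's rstrip/split-into-parts plus one-trip loop by two explicit index scans and direct slicing (no string methods, no parts list); same O(n) cost.


-- ===== PORT A =====
-- fqdn.rstrip("."): exact — drops exactly the trailing '.' characters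
def pyRstripDots (s : List Char) : List Char := (s.reverse.dropWhile (· == '.')).reverse

def fqdn_to_zone_and_label (fqdn : String) : String × String :=
  let f := pyRstripDots fqdn.toList                       -- fqdn = fqdn.rstrip(".")
  let parts := PySem.Chars.splitOn f ['.']                -- parts = fqdn.split(".")
  -- for i in range(1, len(parts)): the body returns unconditionally, so it runs iff 1 < len(parts), with i = 1
  if 1 < parts.length then
    (String.ofList (PySem.Chars.join ['.'] (PySem.List.slice parts (some 1) none) ++ ['.']),   -- ".".join(parts[i:]) + "."
     String.ofList (PySem.Chars.join ['.'] (PySem.List.slice parts none (some 1))))            -- ".".join(parts[:i])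
  else
    (String.ofList (f ++ ['.']), "@")

-- ===== PORT B =====
-- 'while n > 0 and fqdn[n-1] == ".": n -= 1' — structural recursion on n; fqdn[n-1] with 0 < n ≤ len is in range, ported as getD
def pvShrink (cs : List Char) : Nat → Nat
  | 0 => 0
  | n + 1 => if cs.getD n ' ' = '.' then pvShrink cs n else n + 1

-- 'while i < n and fqdn[i] != ".": i += 1' — recursion on n - i; fqdn[i] with i < n ≤ len is in range, ported as getD
def pvScan (cs : List Char) (n i : Nat) : Nat :=
  if i < n then
    if cs.getD i ' ' ≠ '.' then pvScan cs n (i + 1) else i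
  else i
  termination_by n - i

def fqdn_to_zone_and_label_alt (fqdn : String) : String × String :=
  let cs := fqdn.toList
  let n := pvShrink cs cs.length                          -- the trailing-dot scan
  let i := pvScan cs n 0                                  -- the first-dot scan
  if i < n then
    (String.ofList (PySem.List.slice cs (some ((i + 1 : Nat) : Int)) (some (n : Int)) ++ ['.']),  -- fqdn[i+1:n] + "."
     String.ofList (PySem.List.slice cs none (some (i : Int))))                                   -- fqdn[:i]
  else
    (String.ofList (PySem.List.slice cs none (some (n : Int)) ++ ['.']), "@")                     -- fqdn[:n] + ".", "@"

-- ===== PRECONDITION & SPEC =====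
def Spec_fqdn_to_zone_and_label (fqdn : String) (out : String × String) : Prop := out = fqdn_to_zone_and_label_alt fqdn
instance (fqdn : String) (out : String × String) : Decidable (Spec_fqdn_to_zone_and_label fqdn out) := by unfold Spec_fqdn_to_zone_and_label; infer_instance

-- ===== CLAIM (what is proved, stated in full; the proofs are below) =====
def Claim_equal_fqdn_to_zone_and_label : Prop := ∀ (fqdn : String), Dom_fqdn_to_zone_and_label fqdn → Spec_fqdn_to_zone_and_label fqdn (fqdn_to_zone_and_label fqdn)

-- ===== LEMMAS AND PROOFS =====

-- reference splitter for sep = ".": structural recursion on the characters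
def splitDots : List Char → List (List Char)
  | [] => [[]]
  | c :: rest =>
    if c = '.' then [] :: splitDots rest
    else
      match splitDots rest with
      | [] => [[c]]          -- unreachable: splitDots never returns []
      | p :: ps => (c :: p) :: ps

lemma splitDots_ne_nil (l : List Char) : splitDots l ≠ [] := by
  cases l with
  | nil => simp [splitDots]
  | cons c rest =>
    simp only [splitDots]
    split_ifs with hc
    · simp
    · cases h : splitDots rest <;> simp

lemma splitDots_dot (rest : List Char) : splitDots ('.' :: rest) = [] :: splitDots rest := by
  simp [splitDots]

lemma splitDots_cons_ne (c : Char) (rest : List Char) (hc : c ≠ '.') :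
    splitDots (c :: rest) =
      (c :: (splitDots rest).headI) :: (splitDots rest).tail := by
  simp only [splitDots, if_neg hc]
  cases h : splitDots rest with
  | nil => exact absurd h (splitDots_ne_nil rest)
  | cons p ps => simp

lemma headI_splitDots (l : List Char) : (splitDots l).headI = l.takeWhile (· != '.') := by
  induction l with
  | nil => simp [splitDots]
  | cons c rest ih =>
    by_cases hc : c = '.'
    · subst hc; simp [splitDots_dot]
    · rw [splitDots_cons_ne c rest hc]
      simp [hc, ih]

lemma splitOn_go_eq : ∀ (fuel : Nat) (l cur : List Char) (acc : List (List Char)),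
    l.length < fuel →
    PySem.Chars.splitOn.go ['.'] fuel l cur acc =
      acc.reverse ++ (cur.reverse ++ l.takeWhile (· != '.')) :: (splitDots l).tail := by
  intro fuel
  induction fuel with
  | zero => intro l cur acc h; omega
  | succ n ih =>
    intro l cur acc h
    cases l with
    | nil => simp [PySem.Chars.splitOn.go, splitDots]
    | cons c rest =>
      rw [PySem.Chars.splitOn.go]
      by_cases hc : c = '.'
      · subst hc
        have hpre : List.isPrefixOf ['.'] ('.' :: rest) = true := by simp [List.isPrefixOf]
        rw [if_pos hpre]
        simp only [List.length_singleton, List.drop_succ_cons, List.drop_zero]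
        rw [ih rest [] (cur.reverse :: acc) (by simpa using Nat.lt_of_succ_lt_succ h)]
        rw [splitDots_dot]
        have := headI_splitDots rest
        cases hs : splitDots rest with
        | nil => exact absurd hs (splitDots_ne_nil rest)
        | cons p ps =>
          rw [hs] at this
          simp_all
      · have hpre : List.isPrefixOf ['.'] (c :: rest) = false := by
          simp [List.isPrefixOf, Ne.symm hc]
        rw [if_neg (by simp [hpre])]
        rw [ih rest (c :: cur) acc (by simpa using Nat.lt_of_succ_lt_succ h)]
        rw [splitDots_cons_ne c rest hc]
        simp [hc]

lemma splitOn_eq_splitDots (l : List Char) :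
    PySem.Chars.splitOn l ['.'] = splitDots l := by
  rw [PySem.Chars.splitOn, splitOn_go_eq (l.length + 1) l [] [] (by omega)]
  cases h : splitDots l with
  | nil => exact absurd h (splitDots_ne_nil l)
  | cons p ps =>
    have := headI_splitDots l
    rw [h] at this
    simp_all

lemma splitDots_of_dropWhile_nil (l : List Char) (h : l.dropWhile (· != '.') = []) :
    splitDots l = [l] := by
  induction l with
  | nil => simp [splitDots]
  | cons c rest ih =>
    by_cases hc : c = '.'
    · subst hc; simp at h
    · rw [List.dropWhile_cons] at h
      simp only [hc, bne_iff_ne, ne_eq, not_false_iff, if_pos] at h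
      rw [splitDots_cons_ne c rest hc, ih (by simpa [hc] using h)]
      simp

lemma splitDots_of_dropWhile_cons (l zone : List Char) (d : Char)
    (h : l.dropWhile (· != '.') = d :: zone) :
    splitDots l = l.takeWhile (· != '.') :: splitDots zone := by
  induction l with
  | nil => simp at h
  | cons c rest ih =>
    by_cases hc : c = '.'
    · subst hc
      rw [List.dropWhile_cons] at h
      simp only [bne_self_eq_false, Bool.false_eq_true, reduceIte] at h
      cases h
      simp [splitDots_dot]
    · rw [List.dropWhile_cons] at h
      simp only [hc, bne_iff_ne, ne_eq, not_false_iff, if_pos] at h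
      rw [splitDots_cons_ne c rest hc, ih (by simpa [hc] using h)]
      simp [hc]

lemma join_splitDots (l : List Char) :
    PySem.Chars.join ['.'] (splitDots l) = l := by
  induction l with
  | nil => simp [splitDots, PySem.Chars.join_singleton]
  | cons c rest ih =>
    by_cases hc : c = '.'
    · subst hc
      rw [splitDots_dot]
      cases hs : splitDots rest with
      | nil => exact absurd hs (splitDots_ne_nil rest)
      | cons p ps =>
        rw [PySem.Chars.join_cons_cons]
        rw [hs] at ih; rw [ih]
        simp
    · rw [splitDots_cons_ne c rest hc]
      cases hs : splitDots rest with
      | nil => exact absurd hs (splitDots_ne_nil rest)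
      | cons p ps =>
        rw [hs] at ih
        cases ps with
        | nil =>
          simp only [List.headI, List.tail]
          rw [PySem.Chars.join_singleton] at ih ⊢
          simp [ih]
        | cons q qs =>
          simp only [List.headI, List.tail]
          rw [PySem.Chars.join_cons_cons] at ih ⊢
          simp [← ih]

-- the trailing-dot scan computes rstrip(".")
lemma pvShrink_le (cs : List Char) : ∀ n, pvShrink cs n ≤ n := by
  intro n
  induction n with
  | zero => simp [pvShrink]
  | succ n ih =>
    simp only [pvShrink]
    split_ifs <;> omega

lemma take_pvShrink (cs : List Char) : ∀ n, n ≤ cs.length →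
    cs.take (pvShrink cs n) = pyRstripDots (cs.take n) := by
  intro n
  induction n with
  | zero => simp [pvShrink, pyRstripDots]
  | succ n ih =>
    intro h
    have hn : n < cs.length := by omega
    have htake : cs.take (n + 1) = cs.take n ++ [cs[n]] := by
      rw [List.take_add_one]
      simp [hn]
    simp only [pvShrink]
    by_cases hc : cs.getD n ' ' = '.'
    · rw [if_pos hc, ih (by omega), htake]
      have hcg : cs[n] = '.' := by
        rw [List.getD_eq_getElem cs ' ' hn] at hc; exact hc
      simp [pyRstripDots, hcg]
    · rw [if_neg hc, htake]
      have hcg : cs[n] ≠ '.' := by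
        rw [List.getD_eq_getElem cs ' ' hn] at hc; exact hc
      simp only [pyRstripDots, List.reverse_append, List.reverse_cons, List.reverse_nil,
        List.nil_append, List.singleton_append, List.dropWhile_cons]
      simp [hcg]

-- the first-dot scan computes the length of the dot-free prefix of cs.take n
lemma pvScan_eq (cs : List Char) (n : Nat) (hn : n ≤ cs.length) : ∀ i, i ≤ n →
    pvScan cs n i = i + (((cs.take n).drop i).takeWhile (· != '.')).length := by
  intro i hi
  induction hni : n - i generalizing i with
  | zero =>
    have : i = n := by omega
    subst this
    rw [pvScan]
    simp
  | succ k ih =>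
    have hilt : i < n := by omega
    have hicl : i < cs.length := by omega
    rw [pvScan, if_pos hilt]
    have hdrop : (cs.take n).drop i = cs[i] :: (cs.take n).drop (i + 1) := by
      have : i < (cs.take n).length := by simp [Nat.min_eq_left hn]; omega
      rw [List.drop_eq_getElem_cons this]
      congr 1
      simp
    by_cases hc : cs.getD i ' ' = '.'
    · rw [if_neg (not_not_intro hc)]
      have hcg : cs[i] = '.' := by rw [List.getD_eq_getElem cs ' ' hicl] at hc; exact hc
      rw [hdrop]
      simp [hcg]
    · rw [if_pos hc]
      have hcg : cs[i] ≠ '.' := by rw [List.getD_eq_getElem cs ' ' hicl] at hc; exact hc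
      rw [ih (i + 1) (by omega) (by omega), hdrop]
      rw [List.takeWhile_cons]
      simp only [bne_iff_ne, ne_eq, hcg, not_false_iff, if_pos]
      simp
      omega

-- ===== VERDICT (by name: the statement is the Claim_ definition above) =====
theorem fqdn_to_zone_and_label_spec : Claim_equal_fqdn_to_zone_and_label := by
  intro fqdn _
  simp only [Spec_fqdn_to_zone_and_label, fqdn_to_zone_and_label,
    fqdn_to_zone_and_label_alt, splitOn_eq_splitDots]
  set cs := fqdn.toList with hcs
  set n := pvShrink cs cs.length with hn
  have hnle : n ≤ cs.length := pvShrink_le cs cs.length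
  have hstr : cs.take n = pyRstripDots cs := by
    rw [hn, take_pvShrink cs cs.length le_rfl]; simp
  set f := pyRstripDots cs with hf
  have hflen : f.length = n := by rw [← hstr]; simp [Nat.min_eq_left hnle]
  have hscan : pvScan cs n 0 = (f.takeWhile (· != '.')).length := by
    rw [pvScan_eq cs n hnle 0 (by omega)]
    simp [hstr]
  have hsplit : f.takeWhile (· != '.') ++ f.dropWhile (· != '.') = f :=
    List.takeWhile_append_dropWhile
  cases h : f.dropWhile (· != '.') with
  | nil =>
    rw [splitDots_of_dropWhile_nil f h]
    have hi : pvScan cs n 0 = n := by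
      rw [hscan]
      have : f.takeWhile (· != '.') = f := by conv_rhs => rw [← hsplit, h, List.append_nil]
      rw [this, hflen]
    rw [hi]
    simp only [lt_irrefl, if_false, List.length_singleton]
    rw [PySem.List.slice_to_natCast, hstr]
  | cons d zone =>
    rw [splitDots_of_dropWhile_cons f zone d h]
    set i := pvScan cs n 0 with hidef
    set t := f.takeWhile (· != '.') with ht
    have hiw : i = t.length := hscan
    have hfi : f = t ++ d :: zone := by
      conv_lhs => rw [← hsplit, h]
    have hlenf : f.length = t.length + zone.length + 1 := by
      conv_lhs => rw [hfi]
      simp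
      omega
    have hilt : i < n := by
      rw [hiw, ← hflen]; omega
    rw [if_pos hilt]
    have hlen2 : 1 < (f.takeWhile (· != '.') :: splitDots zone).length := by
      cases hs : splitDots zone with
      | nil => exact absurd hs (splitDots_ne_nil zone)
      | cons p ps => simp
    rw [if_pos hlen2]
    have h1 : PySem.List.slice (f.takeWhile (· != '.') :: splitDots zone) (some 1) none
        = splitDots zone := by simp [pysem]
    have h2 : PySem.List.slice (f.takeWhile (· != '.') :: splitDots zone) none (some 1)
        = [f.takeWhile (· != '.')] := by simp [pysem]
    rw [h1, h2, join_splitDots, PySem.Chars.join_singleton]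
    -- zone side: cs[i+1:n] = zone
    have hz : PySem.List.slice cs (some ((i + 1 : Nat) : Int)) (some (n : Int)) = zone := by
      rw [PySem.List.slice_natCast]
      have : (cs.drop (i + 1)).take (n - (i + 1)) = (cs.take n).drop (i + 1) := by
        rw [List.drop_take]
      rw [this, hstr, hiw]
      conv_lhs => rw [hfi]
      rw [List.drop_append]
      simp
    -- label side: cs[:i] = takeWhile
    have hl : PySem.List.slice cs none (some (i : Int)) = f.takeWhile (· != '.') := by
      rw [PySem.List.slice_to_natCast]
      have : cs.take i = (cs.take n).take i := by
        rw [List.take_take, Nat.min_eq_left (by omega)]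
      rw [this, hstr, hiw]
      conv_lhs => rw [hfi]
      rw [List.take_left]

    rw [hz, hl]
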